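-- pv_equiv track=rewrite | github.com/Silver-Fox-Marketing/silver-fox-order-form-enhanced | independent_scraper_transfer.py | transform_scraper_content
-- ===== SOURCE A (Python) =====
-- def transform_scraper_content(original_content, analysis):
--     """Transform scraper content preserving original logic with error handling"""
--
--     lines = original_content.split('\n')
--     transformed_lines = []
--     skip_imports = True
--
--     for line in lines:
--         # Skip original imports until we find the class definition
--         if skip_imports:
--             if line.strip().startswith('class '):
--                 skip_imports = False
--                 transformed_lines.append(line)
--             elif line.strip().startswith('from') or line.strip().startswith('import'):
--                 continue  # Skip original imports
--             elif line.strip() == '':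
--                 continue  # Skip empty lines in import section
--             else:
--                 skip_imports = False
--                 transformed_lines.append(line)
--         else:
--             # Transform helper instantiation
--             if 'self.helper = Helper()' in line:
--                 transformed_lines.append(line.replace('self.helper = Helper()', 'self.helper = EnhancedHelper(DB_CONFIG)'))
--             else:
--                 transformed_lines.append(line)
--
--     return '\n'.join(transformed_lines)
-- ===== SOURCE B (Python) =====
-- def transform_scraper_content(original_content, analysis):
--     """Transform scraper content preserving original logic with error handling"""
--     lines = original_content.split('\n')
--     # Phase 1: advance past the leading import section (blank or from/import lines).
--     i = 0
--     while i < len(lines) and (lines[i].strip() == ''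
--                               or lines[i].strip().startswith(('from', 'import'))):
--         i += 1
--     # Phase 2: one global replace on the joined remainder (the pattern contains
--     # no newline, so this rewrites every helper instantiation uniformly).
--     return '\n'.join(lines[i:]).replace('self.helper = Helper()',
--                                         'self.helper = EnhancedHelper(DB_CONFIG)')
-- ===== Notes on version B (the rewrite author's own statement) =====
-- stated objective: simpler
-- what changed: Replaces A's flag-driven single loop with per-line guarded replaces by two phases: an index scan past the leading import/blank section, then one global str.replace on the joined remainder (no per-line transform loop at all).
-- intended difference: On inputs whose first non-blank non-import line itself contains 'self.helper = Helper()', A emits that boundary line verbatim (leaving the helper instantiation unrewritten) while B rewrites it to 'self.helper = EnhancedHelper(DB_CONFIG)'; rewriting every helper instantiation after the import section is the function's stated purpose, so B's value is the intended one. — e.g. on transform_scraper_content("import os\nself.helper = Helper()", ""): A returns "self.helper = Helper()", B returns "self.helper = EnhancedHelper(DB_CONFIG)"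
import Mathlib
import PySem

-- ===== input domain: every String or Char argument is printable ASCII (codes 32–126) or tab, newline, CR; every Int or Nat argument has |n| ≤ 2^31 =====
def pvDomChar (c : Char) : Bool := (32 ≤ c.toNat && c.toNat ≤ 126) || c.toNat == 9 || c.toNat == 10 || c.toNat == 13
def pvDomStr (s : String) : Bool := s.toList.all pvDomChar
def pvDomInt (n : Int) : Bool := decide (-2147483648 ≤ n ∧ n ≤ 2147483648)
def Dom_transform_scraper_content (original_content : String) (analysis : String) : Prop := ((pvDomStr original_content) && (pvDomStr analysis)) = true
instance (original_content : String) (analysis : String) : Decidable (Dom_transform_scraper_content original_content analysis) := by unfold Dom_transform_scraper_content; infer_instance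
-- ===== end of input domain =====

-- B replaces A's flag-driven loop with per-line guarded replaces by two phases:
-- skip the leading import/blank section, then ONE global replace on the joined
-- remainder (objective: simpler); inside D_ below B rewrites a helper
-- instantiation on the boundary line that A leaves verbatim.

-- ===== PORT A =====
-- one iteration of A's for-loop; state = (transformed_lines, skip_imports)
def pvAStep : (List String × Bool) → String → (List String × Bool)
  | (acc, true), line =>
    if PySem.Str.startswith (PySem.Str.strip line) "class " then (acc ++ [line], false)
    else if PySem.Str.startswith (PySem.Str.strip line) "from"
         || PySem.Str.startswith (PySem.Str.strip line) "import" then (acc, true)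
    else if PySem.Str.strip line == "" then (acc, true)
    else (acc ++ [line], false)
  | (acc, false), line =>
    if PySem.Str.isIn "self.helper = Helper()" line then
      (acc ++ [PySem.Str.replace line "self.helper = Helper()" "self.helper = EnhancedHelper(DB_CONFIG)"], false)
    else (acc ++ [line], false)

-- original_content.split('\n'): the separator is the nonempty literal "\n", so split? is some; .getD [] is never taken
def transform_scraper_content (original_content : String) (analysis : String) : String :=
  let lines := (PySem.Str.split? original_content "\n").getD []
  let r := lines.foldl pvAStep ([], true)
  PySem.Str.join "\n" r.1

-- ===== PORT B =====
-- the while-loop's continue condition: blank line or import line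
def pvBNotCode (line : String) : Bool :=
  (PySem.Str.strip line == "")
  || PySem.Str.startswith (PySem.Str.strip line) "from"
  || PySem.Str.startswith (PySem.Str.strip line) "import"

-- Source B's phase 1: the index scan 'while i < len(lines) and …: i += 1' followed by
-- lines[i:], i.e. drop the longest prefix of blank/import lines
def pvBSkip : List String → List String
  | [] => []
  | l :: t => if pvBNotCode l then pvBSkip t else l :: t

-- Source B's phase 2: one global replace on the joined remainder
def transform_scraper_content_alt (original_content : String) (analysis : String) : String :=
  PySem.Str.replace
    (PySem.Str.join "\n" (pvBSkip ((PySem.Str.split? original_content "\n").getD [])))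
    "self.helper = Helper()" "self.helper = EnhancedHelper(DB_CONFIG)"

-- ===== PRECONDITION & SPEC =====
-- On inputs whose first non-blank non-import line itself contains 'self.helper = Helper()',
-- A emits that boundary line verbatim (leaving the helper instantiation unrewritten) while
-- B rewrites it to 'self.helper = EnhancedHelper(DB_CONFIG)'; rewriting every helper
-- instantiation after the import section is the function's purpose, so B's value is intended.
def D_transform_scraper_content (original_content : String) (analysis : String) : Prop :=
  ∃ i < ((PySem.Str.split? original_content "\n").getD []).length,
    (∀ j < i,
      (PySem.Str.strip (((PySem.Str.split? original_content "\n").getD [])[j]!) = ""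
        ∨ PySem.Str.startswith (PySem.Str.strip (((PySem.Str.split? original_content "\n").getD [])[j]!)) "from" = true
        ∨ PySem.Str.startswith (PySem.Str.strip (((PySem.Str.split? original_content "\n").getD [])[j]!)) "import" = true))
    ∧ ¬ (PySem.Str.strip (((PySem.Str.split? original_content "\n").getD [])[i]!) = ""
        ∨ PySem.Str.startswith (PySem.Str.strip (((PySem.Str.split? original_content "\n").getD [])[i]!)) "from" = true
        ∨ PySem.Str.startswith (PySem.Str.strip (((PySem.Str.split? original_content "\n").getD [])[i]!)) "import" = true)
    ∧ PySem.Str.isIn "self.helper = Helper()" (((PySem.Str.split? original_content "\n").getD [])[i]!) = true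
instance (original_content : String) (analysis : String) : Decidable (D_transform_scraper_content original_content analysis) := by unfold D_transform_scraper_content; infer_instance

def Spec_transform_scraper_content (original_content : String) (analysis : String) (out : String) : Prop := ¬ D_transform_scraper_content original_content analysis → out = transform_scraper_content_alt original_content analysis
instance (original_content : String) (analysis : String) (out : String) : Decidable (Spec_transform_scraper_content original_content analysis out) := by unfold Spec_transform_scraper_content; infer_instance

def pvDiffWitness_transform_scraper_content : String × String :=
  ("import os\nself.helper = Helper()", "")
def pvDiffWitnessOut_transform_scraper_content : String × String :=
  ("self.helper = Helper()", "self.helper = EnhancedHelper(DB_CONFIG)")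

-- ===== CLAIM (what is proved, stated in full; the proofs are below) =====
def Claim_unchanged_transform_scraper_content : Prop := ∀ (original_content : String) (analysis : String), Dom_transform_scraper_content original_content analysis → Spec_transform_scraper_content original_content analysis (transform_scraper_content original_content analysis)
def Claim_changed_transform_scraper_content : Prop := Dom_transform_scraper_content (pvDiffWitness_transform_scraper_content.1) (pvDiffWitness_transform_scraper_content.2) ∧ D_transform_scraper_content (pvDiffWitness_transform_scraper_content.1) (pvDiffWitness_transform_scraper_content.2) ∧ transform_scraper_content (pvDiffWitness_transform_scraper_content.1) (pvDiffWitness_transform_scraper_content.2) = pvDiffWitnessOut_transform_scraper_content.1 ∧ transform_scraper_content_alt (pvDiffWitness_transform_scraper_content.1) (pvDiffWitness_transform_scraper_content.2) = pvDiffWitnessOut_transform_scraper_content.2 ∧ pvDiffWitnessOut_transform_scraper_content.1 ≠ pvDiffWitnessOut_transform_scraper_content.2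
def Claim_exact_transform_scraper_content : Prop := ∀ (original_content : String) (analysis : String), Dom_transform_scraper_content original_content analysis → D_transform_scraper_content original_content analysis → transform_scraper_content original_content analysis ≠ transform_scraper_content_alt original_content analysis

-- ===== LEMMAS AND PROOFS =====

-- proof-side abbreviation for the per-line rewrite
def pvBRepl (line : String) : String :=
  PySem.Str.replace line "self.helper = Helper()" "self.helper = EnhancedHelper(DB_CONFIG)"

-- the boundary predicate (negation of the skip condition)
def pvBBoundary (line : String) : Bool :=
  !(PySem.Str.strip line == "")
  && !(PySem.Str.startswith (PySem.Str.strip line) "from")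
  && !(PySem.Str.startswith (PySem.Str.strip line) "import")

-- first boundary line together with the lines after it (proof-side view of the skip)
def pvBFind : List String → Option (String × List String)
  | [] => none
  | l :: rest => if pvBBoundary l then some (l, rest) else pvBFind rest

theorem pvBBoundary_eq_not (l : String) : pvBBoundary l = !pvBNotCode l := by
  simp [pvBBoundary, pvBNotCode]

theorem pvBFind_eq_skip (ls : List String) :
    pvBFind ls = (match pvBSkip ls with | [] => none | l :: r => some (l, r)) := by
  induction ls with
  | nil => rfl
  | cons l t ih =>
    show (if pvBBoundary l then some (l, t) else pvBFind t) = _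
    rw [pvBBoundary_eq_not]
    show _ = (match (if pvBNotCode l then pvBSkip t else l :: t) with
              | [] => none | l :: r => some (l, r))
    cases h : pvBNotCode l
    · simp
    · simpa using ih

-- proof-side reading of D_: skip condition as a Prop, and D_ over an explicit line list
def pvSkipP (line : String) : Prop :=
  PySem.Str.strip line = ""
    ∨ PySem.Str.startswith (PySem.Str.strip line) "from" = true
    ∨ PySem.Str.startswith (PySem.Str.strip line) "import" = true

def pvDCond (ls : List String) : Prop :=
  ∃ i < ls.length, (∀ j < i, pvSkipP (ls[j]!)) ∧ ¬ pvSkipP (ls[i]!)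
    ∧ PySem.Str.isIn "self.helper = Helper()" (ls[i]!) = true

theorem pvD_eq (oc an : String) :
    D_transform_scraper_content oc an ↔ pvDCond ((PySem.Str.split? oc "\n").getD []) :=
  Iff.rfl

theorem pvBNotCode_iff (l : String) : pvBNotCode l = true ↔ pvSkipP l := by
  simp [pvBNotCode, pvSkipP]
  tauto

theorem pvDCond_iff_skip : ∀ ls : List String, pvDCond ls ↔
    (match pvBSkip ls with
     | [] => False
     | x :: _ => PySem.Str.isIn "self.helper = Helper()" x = true) := by
  intro ls
  induction ls with
  | nil =>
    show pvDCond [] ↔ False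
    simp [pvDCond]
  | cons l t ih =>
    by_cases hb : pvSkipP l
    · have hskip : pvBSkip (l :: t) = pvBSkip t := by
        show (if pvBNotCode l then pvBSkip t else l :: t) = pvBSkip t
        rw [if_pos ((pvBNotCode_iff l).mpr hb)]
      rw [hskip, ← ih]
      constructor
      · rintro ⟨i, hi, hall, hnot, hin⟩
        cases i with
        | zero => exact absurd (by simpa using hb) (by simpa using hnot)
        | succ j =>
          refine ⟨j, by simpa using hi, ?_, by simpa using hnot, by simpa using hin⟩
          intro k hk
          have := hall (k+1) (by omega)
          simpa using this
      · rintro ⟨j, hj, hall, hnot, hin⟩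
        refine ⟨j+1, by simpa using hj, ?_, by simpa using hnot, by simpa using hin⟩
        intro k hk
        cases k with
        | zero => simpa using hb
        | succ m =>
          have := hall m (by omega)
          simpa using this
    · have hstop : pvBSkip (l :: t) = l :: t := by
        show (if pvBNotCode l then pvBSkip t else l :: t) = l :: t
        rw [if_neg (fun hh => hb ((pvBNotCode_iff l).mp hh))]
      rw [hstop]
      constructor
      · rintro ⟨i, hi, hall, hnot, hin⟩
        cases i with
        | zero => simpa using hin
        | succ j => exact absurd (by simpa using hall 0 (by omega)) hb
      · intro hin
        exact ⟨0, by simp, by intro k hk; omega, by simpa using hb, by simpa using hin⟩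

-- replace.go walks the string unchanged when the pattern occurs nowhere in it
theorem pv_replace_go_of_no_occ (old new : List Char) :
    ∀ (fuel : Nat) (l acc : List Char), (∀ j, ¬ old <+: l.drop j) →
      PySem.Chars.replace.go old new fuel l acc = acc.reverse ++ l := by
  intro fuel
  induction fuel with
  | zero => intro l acc _; rw [PySem.Chars.replace.go]
  | succ n ih =>
    intro l acc h
    cases l with
    | nil => rw [PySem.Chars.replace.go] <;> simp
    | cons c t =>
      have h0 : ¬ old <+: (c :: t) := by simpa using h 0
      have h0' : old.isPrefixOf (c :: t) = false :=
        Bool.eq_false_iff.mpr (fun hp => h0 (List.isPrefixOf_iff_prefix.mp hp))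
      rw [PySem.Chars.replace.go]
      simp only [h0', Bool.false_eq_true, if_false]
      rw [ih t (c :: acc) (fun j => by simpa using h (j + 1))]
      simp

-- str.replace is the identity when the (nonempty) pattern does not occur
theorem pv_replace_of_not_isIn (s old new : String)
    (hne : old.toList.isEmpty = false) (h : PySem.Str.isIn old s = false) :
    PySem.Str.replace s old new = s := by
  have hnocc : ∀ j, ¬ old.toList <+: s.toList.drop j := by
    intro j hp
    have hin : PySem.Chars.isIn old.toList s.toList = true :=
      (PySem.Chars.exists_prefix_drop_iff_isIn _ _).mp ⟨j, hp⟩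
    simp only [PySem.Str.isIn] at h
    rw [h] at hin
    exact Bool.false_ne_true hin
  apply String.toList_injective
  rw [show (PySem.Str.replace s old new).toList
        = PySem.Chars.replace s.toList old.toList new.toList from PySem.Str.toList_replace ..]
  rw [PySem.Chars.replace]
  simp only [hne, Bool.false_eq_true, if_false]
  rw [pv_replace_go_of_no_occ _ _ _ _ _ hnocc]
  simp

-- Source B's unconditional replace equals A's guarded replace on every line
theorem pvBRepl_eq_Atrans (l : String) :
    pvBRepl l = (if PySem.Str.isIn "self.helper = Helper()" l then
        PySem.Str.replace l "self.helper = Helper()" "self.helper = EnhancedHelper(DB_CONFIG)"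
      else l) := by
  split_ifs with h
  · rfl
  · exact pv_replace_of_not_isIn _ _ _ (by decide) (by simpa using h)

-- A's loop after the boundary appends the rewrite of every remaining line
theorem pvA_after (ls : List String) : ∀ (acc : List String),
    ls.foldl pvAStep (acc, false) = (acc ++ ls.map pvBRepl, false) := by
  induction ls with
  | nil => intro acc; simp
  | cons l t ih =>
    intro acc
    have hstep : pvAStep (acc, false) l = (acc ++ [pvBRepl l], false) := by
      rw [pvBRepl_eq_Atrans]
      simp only [pvAStep]
      split_ifs <;> rfl
    simp only [List.foldl_cons, List.map_cons, hstep, ih]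
    simp

-- a "class " line satisfies the boundary predicate
theorem pv_class_boundary (l : String)
    (h : PySem.Str.startswith (PySem.Str.strip l) "class " = true) :
    pvBBoundary l = true := by
  simp only [PySem.Str.startswith] at h
  obtain ⟨r, hr⟩ := (PySem.Chars.startswith_iff _ _).mp h
  simp only [pvBBoundary, PySem.Str.startswith, Bool.and_eq_true, Bool.not_eq_true']
  refine ⟨⟨?_, ?_⟩, ?_⟩
  · simp only [beq_eq_false_iff_ne, ne_eq]
    intro he
    rw [he] at hr
    simp at hr
  · cases hb : PySem.Chars.startswith (PySem.Str.strip l).toList "from".toList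
    · rfl
    · obtain ⟨r', hr'⟩ := (PySem.Chars.startswith_iff _ _).mp hb
      rw [← hr] at hr'
      simp at hr'
  · cases hb : PySem.Chars.startswith (PySem.Str.strip l).toList "import".toList
    · rfl
    · obtain ⟨r', hr'⟩ := (PySem.Chars.startswith_iff _ _).mp hb
      rw [← hr] at hr'
      simp at hr'

-- A's whole loop: locate the boundary, then rewrite every later line
theorem pvA_eq_find (ls : List String) :
    (ls.foldl pvAStep ([], true)).1 =
      (match pvBFind ls with
       | none => []
       | some (l, rest) => l :: rest.map pvBRepl) := by
  induction ls with
  | nil => simp [pvBFind]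
  | cons l t ih =>
    by_cases hb : pvBBoundary l = true
    · obtain ⟨⟨h1, h2⟩, h3⟩ :
          ((PySem.Str.strip l == "") = false
            ∧ PySem.Str.startswith (PySem.Str.strip l) "from" = false)
          ∧ PySem.Str.startswith (PySem.Str.strip l) "import" = false := by
        simpa only [pvBBoundary, Bool.and_eq_true, Bool.not_eq_true'] using hb
      have hstep : pvAStep ([], true) l = ([l], false) := by
        simp only [pvAStep]
        by_cases hc : PySem.Str.startswith (PySem.Str.strip l) "class " = true
        · rw [if_pos hc]; rfl
        · rw [if_neg hc, if_neg (by rw [h2, h3]; exact Bool.false_ne_true),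
              if_neg (by rw [h1]; exact Bool.false_ne_true)]
          rfl
      simp only [List.foldl_cons, hstep, pvBFind, hb, if_true]
      rw [pvA_after]
      simp
    · have hnc : ¬ PySem.Str.startswith (PySem.Str.strip l) "class " = true := by
        intro hc
        exact absurd (pv_class_boundary l hc) hb
      have hstep : pvAStep ([], true) l = ([], true) := by
        simp only [pvAStep]
        by_cases h1 : (PySem.Str.strip l == "") = true
        · have he : PySem.Str.strip l = "" := by simpa using h1
          rw [he]
          rw [if_neg (by decide), if_neg (by decide), if_pos (by decide)]
        · have hfi : (PySem.Str.startswith (PySem.Str.strip l) "from"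
              || PySem.Str.startswith (PySem.Str.strip l) "import") = true := by
            by_cases hf : PySem.Str.startswith (PySem.Str.strip l) "from" = true
            · rw [Bool.or_eq_true]; exact Or.inl hf
            · by_cases hi : PySem.Str.startswith (PySem.Str.strip l) "import" = true
              · rw [Bool.or_eq_true]; exact Or.inr hi
              · exact absurd (by
                  simp only [pvBBoundary, Bool.and_eq_true, Bool.not_eq_true']
                  exact ⟨⟨Bool.eq_false_iff.mpr h1, Bool.eq_false_iff.mpr hf⟩,
                    Bool.eq_false_iff.mpr hi⟩) hb
          rw [if_neg hnc, if_pos hfi]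
      simp only [List.foldl_cons, hstep, pvBFind, hb]
      exact ih

-- ===== replace distributes over '\n'-joined lines (pattern has no newline) =====

-- the accumulator of replace.go only collects output: it factors out
theorem pv_go_acc (old new : List Char) :
    ∀ (fuel : Nat) (l acc : List Char),
      PySem.Chars.replace.go old new fuel l acc
        = acc.reverse ++ PySem.Chars.replace.go old new fuel l [] := by
  intro fuel
  induction fuel with
  | zero => intro l acc; rw [PySem.Chars.replace.go, PySem.Chars.replace.go]; simp
  | succ n ih =>
    intro l acc
    cases l with
    | nil => rw [PySem.Chars.replace.go, PySem.Chars.replace.go] <;> simp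
    | cons c t =>
      rw [PySem.Chars.replace.go]
      conv_rhs => rw [PySem.Chars.replace.go]
      cases hp : old.isPrefixOf (c :: t) with
      | true =>
        rw [ih _ (new.reverse ++ acc), ih _ (new.reverse ++ [])]
        simp
      | false =>
        rw [ih t (c :: acc), ih t (c :: [])]
        simp

-- with a nonempty pattern, replace.go ignores the fuel once it covers the string
theorem pv_go_fuel (old new : List Char) (hne : old ≠ []) :
    ∀ (n m : Nat) (l acc : List Char), l.length ≤ n → l.length ≤ m →
      PySem.Chars.replace.go old new n l acc
        = PySem.Chars.replace.go old new m l acc := by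
  intro n
  induction n with
  | zero =>
    intro m l acc h _
    have : l = [] := List.length_eq_zero_iff.mp (Nat.le_zero.mp h)
    subst this
    cases m <;> simp [PySem.Chars.replace.go]
  | succ n ih =>
    intro m l acc h hm
    cases l with
    | nil => cases m <;> simp [PySem.Chars.replace.go]
    | cons c t =>
      cases m with
      | zero => simp at hm
      | succ m' =>
        rw [PySem.Chars.replace.go]
        conv_rhs => rw [PySem.Chars.replace.go]
        cases hp : old.isPrefixOf (c :: t) with
        | true =>
          have hple : old.length ≤ (c :: t).length :=
            List.IsPrefix.length_le (List.isPrefixOf_iff_prefix.mp hp)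
          have hone : 1 ≤ old.length := by
            cases old with
            | nil => exact absurd rfl hne
            | cons _ _ => simp
          apply ih
          · simp only [List.length_drop]
            simp only [List.length_cons] at h hple ⊢
            omega
          · simp only [List.length_drop]
            simp only [List.length_cons] at hm hple ⊢
            omega
        | false =>
          apply ih
          · simp only [List.length_cons] at h; omega
          · simp only [List.length_cons] at hm; omega

-- small-step equations of replace.go (each holds by rfl)
theorem pv_go_zero (old new l acc : List Char) :
    PySem.Chars.replace.go old new 0 l acc = acc.reverse ++ l := rfl
theorem pv_go_step (old new : List Char) (n : Nat) (c : Char) (t acc : List Char) :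
    PySem.Chars.replace.go old new (n+1) (c :: t) acc
      = if old.isPrefixOf (c :: t) then
          PySem.Chars.replace.go old new n (List.drop old.length (c :: t)) (new.reverse ++ acc)
        else PySem.Chars.replace.go old new n t (c :: acc) := rfl

-- the pattern contains no newline, so no occurrence crosses the joined separator:
-- replace.go distributes over a ++ newline :: b
theorem pv_go_append (old new : List Char) (hne : old ≠ []) (hnl : '\n' ∉ old) :
    ∀ (k : Nat) (a b : List Char), a.length ≤ k →
      PySem.Chars.replace.go old new (a ++ '\n' :: b).length (a ++ '\n' :: b) []
        = PySem.Chars.replace.go old new a.length a []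
          ++ '\n' :: PySem.Chars.replace.go old new b.length b [] := by
  intro k
  induction k with
  | zero =>
    intro a b ha
    have : a = [] := List.length_eq_zero_iff.mp (Nat.le_zero.mp ha)
    subst this
    simp only [List.nil_append, List.length_cons, List.length_nil]
    have hp : old.isPrefixOf ('\n' :: b) = false := by
      cases hp : old.isPrefixOf ('\n' :: b) with
      | false => rfl
      | true =>
        obtain ⟨r, hr⟩ := List.isPrefixOf_iff_prefix.mp hp
        cases old with
        | nil => exact absurd rfl hne
        | cons o t =>
          simp only [List.cons_append] at hr
          have : o = '\n' := (List.cons_eq_cons.mp hr).1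
          exact absurd (this ▸ List.mem_cons_self) hnl
    rw [pv_go_step, if_neg (by simp [hp]), pv_go_acc, pv_go_zero]
    rfl
  | succ k ih =>
    intro a b ha
    cases a with
    | nil => exact ih [] b (Nat.zero_le _)
    | cons c t =>
      simp only [List.cons_append, List.length_cons]
      rw [pv_go_step, pv_go_step]
      cases hp : old.isPrefixOf (c :: (t ++ '\n' :: b)) with
      | true =>
        -- the match lies inside a: old is a prefix of c :: t
        have hpa : old <+: (c :: t) := by
          have hpre : old <+: (c :: t) ++ '\n' :: b := by
            simpa using List.isPrefixOf_iff_prefix.mp hp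
          rcases List.prefix_or_prefix_of_prefix
              (⟨'\n' :: b, rfl⟩ : (c :: t) <+: (c :: t) ++ '\n' :: b) hpre with hca | hac
          · obtain ⟨r', hr'⟩ := hca
            cases r' with
            | nil => exact ⟨[], by simpa using hr'.symm⟩
            | cons x xs =>
              exfalso
              obtain ⟨sfx, hs⟩ := hpre
              rw [← hr'] at hs
              simp only [List.append_assoc, List.append_cancel_left_eq] at hs
              have hx : x = '\n' := (List.cons_eq_cons.mp hs).1
              have : x ∈ old := by rw [← hr']; simp
              exact hnl (hx ▸ this)
          · exact hac
        have hp' : old.isPrefixOf (c :: t) = true := List.isPrefixOf_iff_prefix.mpr hpa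
        rw [if_pos (by simpa using hp), if_pos hp']
        have hple : old.length ≤ (c :: t).length := List.IsPrefix.length_le hpa
        have hone : 1 ≤ old.length := by
          cases old with
          | nil => exact absurd rfl hne
          | cons _ _ => simp
        have hdrop : List.drop old.length (c :: (t ++ '\n' :: b))
            = List.drop old.length (c :: t) ++ '\n' :: b := by
          have := List.drop_append_of_le_length (l₂ := '\n' :: b) hple
          simpa using this
        rw [hdrop]
        rw [pv_go_fuel old new hne _ (List.drop old.length (c :: t) ++ '\n' :: b).length _ _
          (by simp only [List.length_append, List.length_drop, List.length_cons] at *; omega)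
          (le_refl _)]
        rw [pv_go_acc, pv_go_acc old new t.length _ (new.reverse ++ [])]
        rw [ih (List.drop old.length (c :: t)) b
          (by simp only [List.length_drop, List.length_cons] at *; omega)]
        rw [pv_go_fuel old new hne t.length (List.drop old.length (c :: t)).length _ _
          (by simp only [List.length_drop, List.length_cons]; omega) (le_refl _)]
        simp
      | false =>
        have hp' : old.isPrefixOf (c :: t) = false := by
          cases hp' : old.isPrefixOf (c :: t) with
          | false => rfl
          | true =>
            have : old <+: c :: (t ++ '\n' :: b) := by
              have := (List.isPrefixOf_iff_prefix.mp hp').trans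
                (⟨'\n' :: b, rfl⟩ : (c :: t) <+: (c :: t) ++ '\n' :: b)
              simpa using this
            rw [List.isPrefixOf_iff_prefix.mpr this] at hp
            exact hp
        rw [if_neg (by simp [hp]), if_neg (by simp [hp'])]
        rw [pv_go_acc, pv_go_acc old new t.length t (c :: [])]
        rw [ih t b (by simp only [List.length_cons] at ha; omega)]
        simp

theorem pv_replace_append (old new a b : List Char) (hne : old ≠ []) (hnl : '\n' ∉ old) :
    PySem.Chars.replace (a ++ '\n' :: b) old new
      = PySem.Chars.replace a old new ++ '\n' :: PySem.Chars.replace b old new := by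
  have hie : old.isEmpty = false := by
    cases old with
    | nil => exact absurd rfl hne
    | cons c t => rfl
  simp only [PySem.Chars.replace, hie, Bool.false_eq_true, if_false]
  exact pv_go_append old new hne hnl (a.length) a b (le_refl _)

-- replace distributes over the newline-join of a list of lines
theorem pv_replace_join (old new : List Char) (hne : old ≠ []) (hnl : '\n' ∉ old) :
    ∀ (ls : List (List Char)),
      PySem.Chars.replace (PySem.Chars.join ['\n'] ls) old new
        = PySem.Chars.join ['\n'] (ls.map (fun s => PySem.Chars.replace s old new)) := by
  have hie : old.isEmpty = false := by
    cases old with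
    | nil => exact absurd rfl hne
    | cons c t => rfl
  intro ls
  induction ls with
  | nil =>
    simp only [List.map_nil, PySem.Chars.join_nil]
    simp only [PySem.Chars.replace, hie, Bool.false_eq_true, if_false]
    rfl
  | cons a t ih =>
    cases t with
    | nil => simp [PySem.Chars.join_singleton]
    | cons b t' =>
      simp only [List.map_cons] at ih ⊢
      rw [PySem.Chars.join_cons_cons, PySem.Chars.join_cons_cons]
      have he : a ++ ['\n'] ++ PySem.Chars.join ['\n'] (b :: t')
          = a ++ '\n' :: PySem.Chars.join ['\n'] (b :: t') := by simp
      rw [he, pv_replace_append old new _ _ hne hnl]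
      rw [show PySem.Chars.join ['\n'] (b :: t')
            = PySem.Chars.join ['\n'] (b :: t') from rfl]
      have ih' : PySem.Chars.replace (PySem.Chars.join ['\n'] (b :: t')) old new
          = PySem.Chars.join ['\n']
              (PySem.Chars.replace b old new :: t'.map (fun s => PySem.Chars.replace s old new)) := by
        simpa using ih
      rw [ih']
      simp

-- ===== length lemmas: replacing a present pattern with a longer one grows the string =====

theorem pv_go_len_ge (old new : List Char) (hle : old.length ≤ new.length) :
    ∀ (fuel : Nat) (l acc : List Char),
      acc.length + l.length ≤ (PySem.Chars.replace.go old new fuel l acc).length := by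
  intro fuel
  induction fuel with
  | zero => intro l acc; rw [PySem.Chars.replace.go]; simp
  | succ n ih =>
    intro l acc
    cases l with
    | nil => rw [PySem.Chars.replace.go] <;> simp
    | cons c t =>
      rw [PySem.Chars.replace.go]
      cases hp : old.isPrefixOf (c :: t) with
      | true =>
        simp only [hp, if_true]
        have hple : old.length ≤ (c :: t).length :=
          List.IsPrefix.length_le (List.isPrefixOf_iff_prefix.mp hp)
        have := ih (List.drop old.length (c :: t)) (new.reverse ++ acc)
        simp only [List.length_append, List.length_reverse, List.length_drop] at this ⊢
        omega
      | false =>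
        simp only [hp, Bool.false_eq_true, if_false]
        have := ih t (c :: acc)
        simp only [List.length_cons] at this ⊢
        omega

theorem pv_go_len_gt (old new : List Char) (hne : old ≠ []) (hlt : old.length < new.length) :
    ∀ (fuel : Nat) (l acc : List Char), l.length ≤ fuel → (∃ j, old <+: l.drop j) →
      acc.length + l.length < (PySem.Chars.replace.go old new fuel l acc).length := by
  intro fuel
  induction fuel with
  | zero =>
    intro l acc h hocc
    have : l = [] := List.length_eq_zero_iff.mp (Nat.le_zero.mp h)
    subst this
    obtain ⟨j, hj⟩ := hocc
    simp only [List.drop_nil] at hj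
    have : old = [] := List.prefix_nil.mp hj
    exact absurd this hne
  | succ n ih =>
    intro l acc h hocc
    cases l with
    | nil =>
      obtain ⟨j, hj⟩ := hocc
      simp only [List.drop_nil] at hj
      exact absurd (List.prefix_nil.mp hj) hne
    | cons c t =>
      rw [PySem.Chars.replace.go]
      cases hp : old.isPrefixOf (c :: t) with
      | true =>
        simp only [hp, if_true]
        have hple : old.length ≤ (c :: t).length :=
          List.IsPrefix.length_le (List.isPrefixOf_iff_prefix.mp hp)
        have hge := pv_go_len_ge old new (le_of_lt hlt) n
          (List.drop old.length (c :: t)) (new.reverse ++ acc)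
        simp only [List.length_append, List.length_reverse, List.length_drop] at hge ⊢
        omega
      | false =>
        simp only [hp, Bool.false_eq_true, if_false]
        have hocc' : ∃ j, old <+: t.drop j := by
          obtain ⟨j, hj⟩ := hocc
          cases j with
          | zero =>
            exfalso
            rw [List.drop_zero] at hj
            rw [List.isPrefixOf_iff_prefix.mpr hj] at hp
            simp at hp
          | succ j' => exact ⟨j', by simpa using hj⟩
        have := ih t (c :: acc) (by simp at h; omega) hocc'
        simp only [List.length_cons] at this ⊢
        omega

-- replacing a present pattern with a strictly longer string changes the string
theorem pv_replace_ne (s old new : String) (hin : PySem.Str.isIn old s = true)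
    (hne : old.toList ≠ []) (hlt : old.toList.length < new.toList.length) :
    PySem.Str.replace s old new ≠ s := by
  intro heq
  have hie : old.toList.isEmpty = false := by
    cases ho : old.toList with
    | nil => exact absurd ho hne
    | cons c t => rfl
  have hocc : ∃ j, old.toList <+: s.toList.drop j := by
    have : PySem.Chars.isIn old.toList s.toList = true := by
      simpa [PySem.Str.isIn] using hin
    exact (PySem.Chars.exists_prefix_drop_iff_isIn _ _).mpr this
  have hlen : s.toList.length < (PySem.Chars.replace s.toList old.toList new.toList).length := by
    simp only [PySem.Chars.replace, hie, Bool.false_eq_true, if_false]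
    have := pv_go_len_gt old.toList new.toList hne hlt s.toList.length s.toList [] (le_refl _) hocc
    simpa using this
  have : (PySem.Str.replace s old new).toList = s.toList := congrArg String.toList heq
  rw [PySem.Str.toList_replace] at this
  rw [this] at hlen
  omega

-- ===== assembling the two sides =====

-- both sides, written over the skipped line list
theorem pvA_as_join (oc an : String) :
    transform_scraper_content oc an
      = PySem.Str.join "\n"
          (match pvBSkip ((PySem.Str.split? oc "\n").getD []) with
           | [] => []
           | l :: rest => l :: rest.map pvBRepl) := by
  show PySem.Str.join "\n"
      ((((PySem.Str.split? oc "\n").getD []).foldl pvAStep ([], true)).1) = _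
  rw [pvA_eq_find, pvBFind_eq_skip]
  cases pvBSkip ((PySem.Str.split? oc "\n").getD []) <;> rfl

theorem pvB_as_join (oc an : String) :
    transform_scraper_content_alt oc an
      = PySem.Str.join "\n"
          ((pvBSkip ((PySem.Str.split? oc "\n").getD [])).map pvBRepl) := by
  unfold transform_scraper_content_alt
  apply String.toList_injective
  rw [PySem.Str.toList_replace, PySem.Str.toList_join, PySem.Str.toList_join]
  have hnl : '\n' ∉ ("self.helper = Helper()" : String).toList := by decide
  have hne : ("self.helper = Helper()" : String).toList ≠ [] := by decide
  rw [show ("\n" : String).toList = ['\n'] from rfl]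
  rw [pv_replace_join _ _ hne hnl]
  congr 1
  simp only [List.map_map]
  apply List.map_congr_left
  intro x _
  show PySem.Chars.replace x.toList _ _ = (pvBRepl x).toList
  rw [show (pvBRepl x).toList = _ from PySem.Str.toList_replace ..]

-- ===== VERDICT (by name: the statements are the Claim_ definitions above) =====
theorem transform_scraper_content_spec : Claim_unchanged_transform_scraper_content := by
  intro oc an _ hD
  show transform_scraper_content oc an = transform_scraper_content_alt oc an
  rw [pvA_as_join, pvB_as_join]
  rw [pvD_eq, pvDCond_iff_skip] at hD
  cases hs : pvBSkip ((PySem.Str.split? oc "\n").getD []) with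
  | nil => rfl
  | cons l rest =>
    rw [hs] at hD
    have hnotin : PySem.Str.isIn "self.helper = Helper()" l = false := by
      cases hi : PySem.Str.isIn "self.helper = Helper()" l
      · rfl
      · exact absurd hi hD
    simp only [List.map_cons]
    have : pvBRepl l = l :=
      pv_replace_of_not_isIn _ _ _ (by decide) hnotin
    rw [this]

theorem transform_scraper_content_changed : Claim_changed_transform_scraper_content := by
  unfold Claim_changed_transform_scraper_content
  refine ⟨by decide, by decide, ?_, ?_, by decide⟩
  · decide
  · decide

theorem transform_scraper_content_tight : Claim_exact_transform_scraper_content := by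
  intro oc an _ hD heq
  rw [pvA_as_join, pvB_as_join] at heq
  rw [pvD_eq, pvDCond_iff_skip] at hD
  cases hs : pvBSkip ((PySem.Str.split? oc "\n").getD []) with
  | nil => rw [hs] at hD; exact hD
  | cons l rest =>
    rw [hs] at hD
    rw [hs] at heq
    have hin : PySem.Str.isIn "self.helper = Helper()" l = true := hD
    have hne : pvBRepl l ≠ l :=
      pv_replace_ne _ _ _ hin (by decide) (by decide)
    apply hne
    simp only [List.map_cons] at heq
    have := congrArg String.toList heq
    rw [PySem.Str.toList_join, PySem.Str.toList_join] at this
    simp only [List.map_cons] at this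
    cases hr : rest.map pvBRepl with
    | nil =>
      rw [hr] at this
      rw [show ("\n" : String).toList = ['\n'] from rfl] at this
      simp only [List.map_nil] at this
      rw [PySem.Chars.join_singleton, PySem.Chars.join_singleton] at this
      exact (String.toList_injective this).symm
    | cons b t =>
      rw [hr] at this
      rw [show ("\n" : String).toList = ['\n'] from rfl] at this
      simp only [List.map_cons] at this
      rw [PySem.Chars.join_cons_cons, PySem.Chars.join_cons_cons] at this
      simp only [List.append_assoc, List.append_cancel_right_eq] at this
      exact (String.toList_injective (by simpa using this)).symm
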